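-- pv_equiv track=rewrite | github.com/edt-yxz-zzd/python3_src | nn_ns/graph/rooted_tree.py | search_parent
-- ===== SOURCE A (Python) =====
-- def search_parent(parent): # list of int or None
--     n = len(parent)
--     to_root = down_to = [None]*n
--     roots = []
--     for v in range(n):
--         if to_root[v] != None: continue
--         p = v
--         stack = []
--         while p != None:
--             if to_root[p] == None:
--                 # going up
--                 down_to[p] = v
--                 stack.append(p)
--                 p = parent[p]
--             elif to_root[p] == v:
--                 # root circle
--                 idx = stack.index(p)
--                 root = min(stack[idx:])
--                 roots.append(root)
--                 break
--             else:
--                 # this is a branch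
--                 root = to_root[p]
--                 break
--         else:
--             # root
--             root = stack[-1]
--             roots.append(root)
--         for v in stack:
--             to_root[v] = root
--
--     return roots, to_root
-- ===== SOURCE B (Python) =====
-- def search_parent(parent):  # list of int or None
--     n = len(parent)
--
--     def cycle_min(p):
--         # p lies on a cycle: walk once around it collecting the minimum
--         m = p
--         q = parent[p]
--         while q != p:
--             if q < m:
--                 m = q
--             q = parent[q]
--         return m
--
--     def root_of(v):
--         # pure, stateless per-node resolution: no shared memo, no branch case
--         seen = set()
--         p = v
--         while True:
--             if parent[p] is None:
--                 return p
--             if p in seen: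
--                 return cycle_min(p)
--             seen.add(p)
--             p = parent[p]
--
--     to_root = [root_of(v) for v in range(n)]
--     roots = []
--     emitted = set()
--     for r in to_root:
--         if r not in emitted:
--             emitted.add(r)
--             roots.append(r)
--     return roots, to_root
-- ===== Notes on version B (the rewrite author's own statement) =====
-- stated objective: alternative
-- what changed: B drops A's single stateful sweep (shared to_root/down_to memo aliasing, in-progress v-markers, three-way branch with inheritance, in-loop roots appends, path list with index/slice/min) and instead resolves every node independently with a pure stateless walk whose cycle root comes from a second walk once around the cycle, then derives roots by a separate first-occurrence deduplication pass over to_root.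
-- outside the precondition, e.g. on search_parent([None, -2]): A returns ([0], [0, 0]), B returns ([0, -2], [0, -2])
import Mathlib
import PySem

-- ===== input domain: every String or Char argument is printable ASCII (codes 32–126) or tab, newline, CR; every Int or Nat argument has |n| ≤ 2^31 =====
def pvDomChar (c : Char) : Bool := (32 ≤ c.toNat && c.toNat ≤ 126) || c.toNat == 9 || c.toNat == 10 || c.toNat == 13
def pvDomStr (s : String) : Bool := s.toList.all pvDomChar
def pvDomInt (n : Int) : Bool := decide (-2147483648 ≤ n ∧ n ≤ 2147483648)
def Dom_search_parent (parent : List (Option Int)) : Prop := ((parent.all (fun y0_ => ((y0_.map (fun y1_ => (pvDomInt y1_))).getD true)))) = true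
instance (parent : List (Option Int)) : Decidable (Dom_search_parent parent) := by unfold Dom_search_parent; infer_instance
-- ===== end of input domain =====

-- B resolves every node independently with a pure stateless walk (cycle root found by a second walk
-- once around the cycle) and derives `roots` by a separate first-occurrence dedup pass, replacing A's
-- single stateful sweep with aliased memo, v-markers, branch inheritance and in-loop appends; objective: alternative.

-- ===== PORT A =====
-- final write loop 'for v in stack: to_root[v] = root'
def spWriteAll (t : List (Option Int)) (s : List Int) (x : Int) : List (Option Int) :=
  s.foldl (fun t u => PySem.List.pySetD t u (some x)) t

-- A's while loop (fuel only makes it total; never exhausted on Pre_ inputs; none = an exception in Python)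
def spA_inner (parent : List (Option Int)) (v : Int) :
    Nat → Option Int → List (Option Int) → List Int → List Int →
    Option (List (Option Int) × List Int × List Int × Int)
  | 0, _, _, _, _ => none
  | fuel+1, pOpt, to_root, stack, roots =>
    match pOpt with
    | none =>
      -- while-else: root = stack[-1]; roots.append(root)
      match PySem.List.pyGet? stack (-1) with
      | none => none
      | some root => some (to_root, stack, roots ++ [root], root)
    | some p =>
      match PySem.List.pyGet? to_root p with
      | none => none
      | some cell =>
        if cell = none then
          -- going up: down_to[p] = v (aliased with to_root); stack.append(p); p = parent[p]
          match PySem.List.pyGet? parent p with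
          | none => none
          | some p' => spA_inner parent v fuel p' (PySem.List.pySetD to_root p (some v)) (stack ++ [p]) roots
        else if cell = some v then
          -- root circle: idx = stack.index(p); root = min(stack[idx:]); roots.append(root)
          match PySem.List.index? stack p with
          | none => none
          | some idx =>
            match PySem.List.min? (PySem.List.slice stack (some (idx : Int)) none) (fun x => x) with
            | none => none
            | some root => some (to_root, stack, roots ++ [root], root)
        else
          -- branch: root = to_root[p]
          match cell with
          | some root => some (to_root, stack, roots, root)
          | none => none

def spA_step (parent : List (Option Int)) (st : List Int × List (Option Int)) (v : Int) :
    List Int × List (Option Int) :=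
  match PySem.List.pyGet? st.2 v with
  | none => st
  | some cell =>
    if cell ≠ none then st
    else
      match spA_inner parent v (parent.length + 1) (some v) st.2 [] st.1 with
      | none => st
      | some (tr, stack, roots, root) => (roots, spWriteAll tr stack root)

def search_parent (parent : List (Option Int)) : List Int × List (Option Int) :=
  (PySem.List.pyRange 0 (parent.length : Int) 1).foldl (spA_step parent)
    ([], List.replicate parent.length none)

-- ===== PORT B =====
-- cycle_min(p): m = p; q = parent[p]; while q != p: m = min(m,q); q = parent[q]
-- (fuel only makes it total; never exhausted on Pre_ inputs; none = an exception in Python)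
def altCycleMin (parent : List (Option Int)) (p : Int) :
    Nat → Int → Int → Option Int
  | 0, _, _ => none
  | fuel+1, m, q =>
    if q = p then some m
    else
      match PySem.List.pyGet? parent q with
      | some (some q') => altCycleMin parent p fuel (if q < m then q else m) q'
      | _ => none

-- root_of(v): pure stateless walk; stops at a missing parent (tree root) or on revisiting a node
-- of the current walk (cycle: second walk computes the min)
def altRootOf (parent : List (Option Int)) :
    Nat → Int → PySem.Set Int → Option Int
  | 0, _, _ => none
  | fuel+1, p, seen =>
    match PySem.List.pyGet? parent p with
    | none => none
    | some none => some p
    | some (some w) =>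
      if PySem.Set.contains seen p then altCycleMin parent p (parent.length + 1) p w
      else altRootOf parent fuel w (PySem.Set.add seen p)

-- first-occurrence dedup pass for roots (a none entry — impossible under Pre_ — is skipped)
def altDedupStep (st : List Int × PySem.Set Int) (r? : Option Int) : List Int × PySem.Set Int :=
  match r? with
  | none => st
  | some r => if PySem.Set.contains st.2 r then st else (st.1 ++ [r], PySem.Set.add st.2 r)

def search_parent_alt (parent : List (Option Int)) : List Int × List (Option Int) :=
  let to_root := (PySem.List.pyRange 0 (parent.length : Int) 1).map
    (fun v => altRootOf parent (parent.length + 1) v PySem.Set.empty)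
  ((to_root.foldl altDedupStep ([], PySem.Set.empty)).1, to_root)

-- ===== PRECONDITION & SPEC =====
def pvOkIdx (n : Int) : Option Int → Bool
  | none => true
  | some k => decide (0 ≤ k ∧ k < n)

-- Pre_ excludes parent entries that are out of range (A raises IndexError there) and negative
-- in-range entries (Python's negative-index wraparound: A then either raises ValueError at
-- stack.index or returns a value through the accidental aliasing of to_root/down_to; a
-- defensible-corner artefact of A's implementation).
def Pre_search_parent (parent : List (Option Int)) : Prop :=
  parent.all (pvOkIdx (parent.length : Int)) = true

instance (parent : List (Option Int)) : Decidable (Pre_search_parent parent) := by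
  unfold Pre_search_parent; infer_instance

def pvWitness_search_parent : List (Option Int) := [some 1, some 0, none, some 2]

def Spec_search_parent (parent : List (Option Int)) (out : List Int × List (Option Int)) : Prop :=
  out = search_parent_alt parent
instance (parent : List (Option Int)) (out : List Int × List (Option Int)) :
    Decidable (Spec_search_parent parent out) := by unfold Spec_search_parent; infer_instance

-- ===== CLAIM (what is proved, stated in full; the proofs are below) =====
def Claim_equal_search_parent : Prop :=
  ∀ (parent : List (Option Int)), Dom_search_parent parent → Pre_search_parent parent →
    Spec_search_parent parent (search_parent parent)

-- ===== LEMMAS AND PROOFS =====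

-- ---------- trajectory machinery over the parent map ----------

def pnext (parent : List (Option Int)) (p : Int) : Option Int := (parent[p.toNat]?).join

def pstep (parent : List (Option Int)) (a b : Int) : Prop := pnext parent a = some b

def piter (parent : List (Option Int)) : Nat → Int → Option Int
  | 0, v => some v
  | k+1, v => (pnext parent v).bind (piter parent k)

def reaches (parent : List (Option Int)) (v u : Int) : Prop :=
  ∃ k, piter parent k v = some u

def periodicN (parent : List (Option Int)) (u : Int) : Prop :=
  ∃ m, 0 < m ∧ piter parent m u = some u

def InR (parent : List (Option Int)) (p : Int) : Prop :=
  0 ≤ p ∧ p < (parent.length : Int)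

def isRootOf (parent : List (Option Int)) (v r : Int) : Prop :=
  reaches parent v r ∧
    (pnext parent r = none ∨
      (periodicN parent r ∧ ∀ u, reaches parent v u → periodicN parent u → r ≤ u))

def rootB (parent : List (Option Int)) (v : Int) : Option Int :=
  altRootOf parent (parent.length + 1) v PySem.Set.empty

-- ---------- basic lemmas ----------

theorem piter_add (parent : List (Option Int)) (a b : Nat) (v : Int) :
    piter parent (a + b) v = (piter parent a v).bind (piter parent b) := by
  induction a generalizing v with
  | zero => simp [piter]
  | succ a ih =>
    rw [Nat.succ_add]
    show (pnext parent v).bind (piter parent (a + b)) = _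
    cases h : pnext parent v with
    | none => simp [piter, h]
    | some w => simp [piter, h, ih]

theorem reaches_refl (parent : List (Option Int)) (v : Int) : reaches parent v v :=
  ⟨0, rfl⟩

theorem reaches_head {parent : List (Option Int)} {v w u : Int}
    (h : pstep parent v w) (h2 : reaches parent w u) : reaches parent v u := by
  obtain ⟨k, hk⟩ := h2
  exact ⟨k + 1, by show (pnext parent v).bind _ = _; rw [h]; exact hk⟩

theorem pre_step_InR {parent : List (Option Int)} (hPre : Pre_search_parent parent)
    {p w : Int} (hp : InR parent p) (h : pstep parent p w) : InR parent w := by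
  unfold pstep pnext at h
  obtain ⟨hp0, hpl⟩ := hp
  have hlt : p.toNat < parent.length := by omega
  rw [List.getElem?_eq_getElem hlt] at h
  have hmem : parent[p.toNat] ∈ parent := List.getElem_mem hlt
  have := List.all_eq_true.mp hPre _ hmem
  cases hc : parent[p.toNat] with
  | none => rw [hc] at h; simp [Option.join] at h
  | some w' =>
    rw [hc] at h
    simp [Option.join] at h
    subst h
    rw [hc] at this
    simpa [pvOkIdx, InR] using this

theorem terminal_piter {parent : List (Option Int)} {t : Int}
    (h : pnext parent t = none) {k : Nat} (hk : 0 < k) : piter parent k t = none := by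
  cases k with
  | zero => omega
  | succ k => show (pnext parent t).bind _ = _; rw [h]; rfl

theorem reaches_terminal {parent : List (Option Int)} {t u : Int}
    (h : pnext parent t = none) (hr : reaches parent t u) : u = t := by
  obtain ⟨k, hk⟩ := hr
  cases k with
  | zero => cases hk; rfl
  | succ k => rw [terminal_piter h (Nat.succ_pos k)] at hk; cases hk

theorem reaches_linear {parent : List (Option Int)} {v a b : Int}
    (ha : reaches parent v a) (hb : reaches parent v b) :
    reaches parent a b ∨ reaches parent b a := by
  obtain ⟨i, hi⟩ := ha; obtain ⟨j, hj⟩ := hb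
  rcases Nat.le_total i j with h | h
  · left
    refine ⟨j - i, ?_⟩
    have : piter parent (i + (j - i)) v = some b := by rwa [Nat.add_sub_cancel' h]
    rwa [piter_add, hi] at this
  · right
    refine ⟨i - j, ?_⟩
    have : piter parent (j + (i - j)) v = some a := by rwa [Nat.add_sub_cancel' h]
    rwa [piter_add, hj] at this

theorem piter_mul_period {parent : List (Option Int)} {u : Int} {m : Nat}
    (h : piter parent m u = some u) (c : Nat) : piter parent (c * m) u = some u := by
  induction c with
  | zero => simp [piter]
  | succ c ih => rw [Nat.succ_mul, piter_add, ih]; exact h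

theorem periodic_reach_back {parent : List (Option Int)} {u w : Int}
    (hp : periodicN parent u) (hr : reaches parent u w) : reaches parent w u := by
  obtain ⟨m, hm0, hm⟩ := hp
  obtain ⟨k, hk⟩ := hr
  have hc : k ≤ (k + 1) * m := by
    calc k ≤ k + 1 := by omega
    _ ≤ (k + 1) * m := Nat.le_mul_of_pos_right _ hm0
  refine ⟨(k + 1) * m - k, ?_⟩
  have h1 : piter parent ((k + 1) * m) u = some u := piter_mul_period hm _
  have h2 : piter parent (k + ((k + 1) * m - k)) u = some u := by rwa [Nat.add_sub_cancel' hc]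
  rwa [piter_add, hk] at h2

theorem periodic_of_reach {parent : List (Option Int)} {u w : Int}
    (hp : periodicN parent u) (hr : reaches parent u w) : periodicN parent w := by
  obtain ⟨m, hm0, hm⟩ := hp
  obtain ⟨k, hk⟩ := hr
  refine ⟨m, hm0, ?_⟩
  have h1 : piter parent (k + m) u = some w := by
    rw [Nat.add_comm, piter_add, hm]; exact hk
  have h2 : piter parent (k + m) u = (piter parent k u).bind (piter parent m) := piter_add ..
  rw [h1, hk] at h2
  exact h2.symm

theorem periodic_not_terminal {parent : List (Option Int)} {u : Int}
    (hp : periodicN parent u) (ht : pnext parent u = none) : False := by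
  obtain ⟨m, hm0, hm⟩ := hp
  rw [terminal_piter ht hm0] at hm
  cases hm

theorem rootOf_unique {parent : List (Option Int)} {v r r' : Int}
    (h1 : isRootOf parent v r) (h2 : isRootOf parent v r') : r = r' := by
  obtain ⟨hr1, hd1⟩ := h1
  obtain ⟨hr2, hd2⟩ := h2
  rcases hd1 with ht1 | ⟨hp1, hmin1⟩
  · rcases hd2 with ht2 | ⟨hp2, hmin2⟩
    · rcases reaches_linear hr1 hr2 with h | h
      · exact (reaches_terminal ht1 h).symm
      · exact reaches_terminal ht2 h
    · rcases reaches_linear hr1 hr2 with h | h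
      · have := reaches_terminal ht1 h; subst this
        exact absurd ht1 (fun ht => periodic_not_terminal hp2 ht)
      · exact absurd ht1 (fun ht => periodic_not_terminal (periodic_of_reach hp2 h) ht)
  · rcases hd2 with ht2 | ⟨hp2, hmin2⟩
    · rcases reaches_linear hr1 hr2 with h | h
      · exact absurd ht2 (fun ht => periodic_not_terminal (periodic_of_reach hp1 h) ht)
      · have := reaches_terminal ht2 h; subst this
        exact absurd ht2 (fun ht => periodic_not_terminal hp1 ht)
    · exact le_antisymm (hmin1 r' hr2 hp2) (hmin2 r hr1 hp1)

theorem rootOf_step {parent : List (Option Int)} {v w r : Int}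
    (h : pstep parent v w) (hr : isRootOf parent w r) : isRootOf parent v r := by
  obtain ⟨hre, hd⟩ := hr
  refine ⟨reaches_head h hre, ?_⟩
  rcases hd with ht | ⟨hp, hmin⟩
  · exact Or.inl ht
  · refine Or.inr ⟨hp, ?_⟩
    intro u hu hup
    obtain ⟨k, hk⟩ := hu
    cases k with
    | zero =>
      obtain rfl : v = u := by simpa [piter] using hk
      have hw1 : reaches parent v w := ⟨1, by show (pnext parent v).bind _ = _; rw [h]; rfl⟩
      exact hmin v (periodic_reach_back hup hw1) hup
    | succ k =>
      change (pnext parent v).bind _ = _ at hk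
      rw [h] at hk
      exact hmin u ⟨k, hk⟩ hup

theorem rootOf_chain {parent : List (Option Int)} {v w r : Int}
    (h : reaches parent v w) (hr : isRootOf parent w r) : isRootOf parent v r := by
  obtain ⟨k, hk⟩ := h
  induction k generalizing v with
  | zero => cases hk; exact hr
  | succ k ih =>
    change (pnext parent v).bind _ = _ at hk
    cases hx : pnext parent v with
    | none => rw [hx] at hk; cases hk
    | some x => rw [hx] at hk; exact rootOf_step hx (ih hk)

-- ---------- chains and closed sets ----------

theorem chain_piter_getElem {parent : List (Option Int)} {L : List Int}
    (h : List.IsChain (pstep parent) L) (d i : Nat) (hd : i + d < L.length) :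
    piter parent d L[i] = some L[i + d] := by
  induction d generalizing i with
  | zero => simp [piter]
  | succ d ih =>
    have hstep : pstep parent L[i] L[i+1] :=
      List.isChain_iff_getElem.mp h i (by omega)
    show (pnext parent L[i]).bind _ = _
    rw [hstep]
    have := ih (i + 1) (by omega)
    simpa [Nat.add_comm, Nat.add_left_comm, Nat.add_assoc] using this

theorem chain_reaches {parent : List (Option Int)} {L : List Int}
    (h : List.IsChain (pstep parent) L) {i j : Nat} (hij : i ≤ j) (hj : j < L.length) :
    reaches parent L[i] L[j] := by
  obtain ⟨d, rfl⟩ : ∃ d, j = i + d := ⟨j - i, by omega⟩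
  exact ⟨d, chain_piter_getElem h d i (by omega)⟩

theorem closed_piter {parent : List (Option Int)} {S : List Int}
    (hS : ∀ x ∈ S, ∀ y, pstep parent x y → y ∈ S) {v u : Int} (hv : v ∈ S)
    {k : Nat} (hk : piter parent k v = some u) : u ∈ S := by
  induction k generalizing v with
  | zero => cases hk; exact hv
  | succ k ih =>
    change (pnext parent v).bind _ = _ at hk
    cases hx : pnext parent v with
    | none => rw [hx] at hk; cases hk
    | some x => rw [hx] at hk; exact ih (hS v hv x hx) hk

theorem nodup_inr_length {parent : List (Option Int)} {L : List Int}
    (hnd : L.Nodup) (hin : ∀ x ∈ L, InR parent x) : L.length ≤ parent.length := by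
  classical
  have hsub : L.toFinset ⊆ Finset.Ico (0 : Int) (parent.length : Int) := by
    intro x hx
    rw [List.mem_toFinset] at hx
    have := hin x hx
    simp [Finset.mem_Ico]; exact ⟨this.1, this.2⟩
  have hcard := Finset.card_le_card hsub
  rw [List.toFinset_card_of_nodup hnd] at hcard
  simpa using hcard

theorem pg_pnext {parent : List (Option Int)} {p : Int} (hp : InR parent p) :
    PySem.List.pyGet? parent p = some (pnext parent p) := by
  rw [PySem.List.pyGet?_of_nonneg _ hp.1]
  have hlt : p.toNat < parent.length := by
    obtain ⟨h1, h2⟩ := hp; omega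
  rw [List.getElem?_eq_getElem hlt]
  unfold pnext
  rw [List.getElem?_eq_getElem hlt]
  rfl

-- ---------- spWriteAll lemmas ----------

theorem length_spWriteAll (s : List Int) (t : List (Option Int)) (x : Int) :
    (spWriteAll t s x).length = t.length := by
  induction s generalizing t with
  | nil => rfl
  | cons u s ih => simp [spWriteAll, List.foldl_cons] at *; rw [ih]; simp [PySem.List.length_pySetD]

theorem getElem?_spWriteAll (s : List Int) (t : List (Option Int)) (x : Int)
    (hs : ∀ u ∈ s, 0 ≤ u ∧ u < (t.length : Int)) (i : Nat) :
    (spWriteAll t s x)[i]? = if (i : Int) ∈ s then some (some x) else t[i]? := by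
  induction s generalizing t with
  | nil => simp [spWriteAll]
  | cons u s ih =>
    obtain ⟨hu0, hul⟩ := hs u (by simp)
    have hset : PySem.List.pySetD t u (some x) = t.set u.toNat (some x) :=
      PySem.List.pySetD_of_nonneg t (some x) hu0
    have hstep : spWriteAll t (u :: s) x = spWriteAll (t.set u.toNat (some x)) s x := by
      simp [spWriteAll, List.foldl_cons, hset]
    rw [hstep, ih _ (by intro w hw; have := hs w (by simp [hw]); simpa using this)]
    by_cases hmem : (i : Int) ∈ s
    · simp [hmem]
    · have : ((i : Int) ∈ u :: s) ↔ (i : Int) = u := by simp [hmem]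
      rw [if_neg hmem]
      by_cases heq : (i : Int) = u
      · have hiu : i = u.toNat := by omega
        rw [if_pos (this.mpr heq)]
        subst hiu
        have hlt : u.toNat < t.length := by omega
        simp [hlt]
      · rw [if_neg (by simp [this, heq])]
        rw [List.getElem?_set_ne (by omega)]

theorem spWriteAll_overwrite (s : List Int) (t : List (Option Int)) (x y : Int)
    (hs : ∀ u ∈ s, 0 ≤ u ∧ u < (t.length : Int)) :
    spWriteAll (spWriteAll t s x) s y = spWriteAll t s y := by
  have hs' : ∀ u ∈ s, 0 ≤ u ∧ u < ((spWriteAll t s x).length : Int) := by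
    rw [length_spWriteAll]; exact hs
  apply List.ext_getElem?
  intro i
  rw [getElem?_spWriteAll s _ y hs' i, getElem?_spWriteAll s t y hs i]
  by_cases hmem : (i : Int) ∈ s
  · simp [hmem]
  · rw [if_neg hmem, if_neg hmem, getElem?_spWriteAll s t x hs i, if_neg hmem]

-- ---------- B-side: cycle-min and walk correctness ----------

theorem foldl_min_spec (L : List Int) (m : Int) :
    (L.foldl (fun a b => if b < a then b else a) m = m ∨
      L.foldl (fun a b => if b < a then b else a) m ∈ L) ∧
    L.foldl (fun a b => if b < a then b else a) m ≤ m ∧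
    ∀ x ∈ L, L.foldl (fun a b => if b < a then b else a) m ≤ x := by
  induction L generalizing m with
  | nil => simp
  | cons y L ih =>
    simp only [List.foldl_cons]
    obtain ⟨h1, h2, h3⟩ := ih (if y < m then y else m)
    constructor
    · rcases h1 with h | h
      · rw [h]; split_ifs with hy
        · right; simp
        · left; rfl
      · right; simp [h]
    · constructor
      · refine le_trans h2 ?_
        split_ifs <;> omega
      · intro x hx
        rcases List.mem_cons.mp hx with rfl | hx
        · refine le_trans h2 ?_
          split_ifs <;> omega
        · exact h3 x hx

theorem cm_run {parent : List (Option Int)} (hPre : Pre_search_parent parent) (p : Int) :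
    ∀ (rest : List Int) (fuel : Nat) (m q : Int),
    List.IsChain (pstep parent) (q :: rest ++ [p]) → p ∉ q :: rest →
    (∀ x ∈ q :: rest, InR parent x) → rest.length + 2 ≤ fuel →
    altCycleMin parent p fuel m q =
      some ((q :: rest).foldl (fun a b => if b < a then b else a) m) := by
  intro rest
  induction rest with
  | nil =>
    intro fuel m q hch hnp hin hfuel
    obtain ⟨f, rfl⟩ : ∃ f, fuel = f + 2 := ⟨fuel - 2, by omega⟩
    have hqp : q ≠ p := by simp at hnp; exact fun h => hnp h.symm
    have hstep : pstep parent q p := by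
      have := List.isChain_iff_getElem.mp hch 0 (by simp)
      simpa using this
    have hq : InR parent q := hin q (by simp)
    show altCycleMin parent p (f + 1 + 1) m q = _
    unfold altCycleMin
    rw [if_neg hqp, pg_pnext hq, hstep]
    show altCycleMin parent p (f + 1) (if q < m then q else m) p = _
    unfold altCycleMin
    rw [if_pos rfl]
    simp
  | cons x rest ih =>
    intro fuel m q hch hnp hin hfuel
    obtain ⟨f, rfl⟩ : ∃ f, fuel = f + 1 := ⟨fuel - 1, by omega⟩
    have hqp : q ≠ p := fun h => hnp (h ▸ List.mem_cons_self ..)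
    have hstep : pstep parent q x := by
      have := List.isChain_iff_getElem.mp hch 0 (by simp)
      simpa using this
    have hq : InR parent q := hin q (by simp)
    show altCycleMin parent p (f + 1) m q = _
    unfold altCycleMin
    rw [if_neg hqp, pg_pnext hq, hstep]
    show altCycleMin parent p f (if q < m then q else m) x = _
    rw [ih f (if q < m then q else m) x
      (by simpa using (List.isChain_cons_cons.mp (by simpa using hch)).2)
      (by intro h; exact hnp (List.mem_cons_of_mem _ h))
      (by intro y hy; exact hin y (List.mem_cons_of_mem _ hy))
      (by simp at hfuel ⊢; omega)]
    simp

theorem cm_main {parent : List (Option Int)} (hPre : Pre_search_parent parent)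
    {p w : Int} {P₂ : List Int}
    (hch : List.IsChain (pstep parent) ((p :: P₂) ++ [p]))
    (hnd : (p :: P₂).Nodup) (hin : ∀ x ∈ p :: P₂, InR parent x)
    (hw : pstep parent p w) :
    ∃ m, altCycleMin parent p (parent.length + 1) p w = some m ∧
      m ∈ p :: P₂ ∧ ∀ x ∈ p :: P₂, m ≤ x := by
  cases P₂ with
  | nil =>
    -- self-loop: parent[p] = p, so w = p and the walk returns p at once
    have hpp : pstep parent p p := by
      have := List.isChain_iff_getElem.mp hch 0 (by simp)
      simpa using this
    have hwp : w = p := by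
      unfold pstep at hpp hw
      rw [hpp] at hw
      injection hw with h
      exact h.symm
    refine ⟨p, ?_, by simp, by simp⟩
    rw [hwp]
    show altCycleMin parent p (parent.length + 1) p p = some p
    unfold altCycleMin
    rw [if_pos rfl]
  | cons x P₂' =>
    have hpx : pstep parent p x := by
      have := List.isChain_iff_getElem.mp hch 0 (by simp)
      simpa using this
    have hwx : w = x := by
      unfold pstep at hpx hw
      rw [hpx] at hw
      injection hw with h
      exact h.symm
    rw [hwx]
    have hlen := nodup_inr_length hnd hin
    have hrun := cm_run hPre p P₂' (parent.length + 1) p x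
      (by
        have : List.IsChain (pstep parent) ((p :: x :: P₂') ++ [p]) := hch
        simpa using (List.isChain_cons_cons.mp (by simpa using this)).2)
      (by
        intro hmem
        have : p ∉ x :: P₂' := by
          have := List.nodup_cons.mp hnd
          exact this.1
        exact this hmem)
      (by intro y hy; exact hin y (List.mem_cons_of_mem _ hy))
      (by simp at hlen ⊢; omega)
    refine ⟨_, hrun, ?_, ?_⟩
    · obtain ⟨h1, _, _⟩ := foldl_min_spec (x :: P₂') p
      rcases h1 with h | h
      · rw [h]; simp
      · exact List.mem_cons_of_mem _ h
    · intro y hy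
      obtain ⟨h1, h2, h3⟩ := foldl_min_spec (x :: P₂') p
      rcases List.mem_cons.mp hy with rfl | hy
      · exact h2
      · exact h3 y hy

theorem pstep_det {parent : List (Option Int)} {a b c : Int}
    (h1 : pstep parent a b) (h2 : pstep parent a c) : b = c := by
  unfold pstep at h1 h2
  rw [h1] at h2
  injection h2

theorem chain_head?_reaches {parent : List (Option Int)} {L : List Int} {v x : Int}
    (h : List.IsChain (pstep parent) L) (hh : L.head? = some v) (hx : x ∈ L) :
    reaches parent v x := by
  obtain ⟨j, hj, rfl⟩ := List.mem_iff_getElem.mp hx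
  have hv : L[0]'(by omega) = v := by
    cases L with
    | nil => simp at hh
    | cons a t => simpa using hh
  have := chain_reaches h (Nat.zero_le j) hj
  rwa [hv] at this

theorem loop_facts {parent : List (Option Int)} {C' : List Int} {p : Int}
    (hch : List.IsChain (pstep parent) (C' ++ [p])) (hh : C'.head? = some p) :
    periodicN parent p ∧ (∀ x ∈ C', reaches parent p x ∧ reaches parent x p) ∧
    (∀ x ∈ C', ∀ y, pstep parent x y → y ∈ C') := by
  have hc0 : 0 < C'.length := by cases C' <;> simp_all
  have hL0 : (C' ++ [p])[0]'(by simp only [List.length_append, List.length_cons, List.length_nil, List.length_singleton]; omega) = p := by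
    rw [List.getElem_append_left hc0]
    cases C' with
    | nil => simp at hh
    | cons a t => simpa using hh
  have hLc : (C' ++ [p])[C'.length]'(by simp) = p := by
    rw [List.getElem_append_right (le_refl _)]
    simp
  have hmemp : p ∈ C' := by
    cases C' with
    | nil => simp at hh
    | cons a t => simp at hh; simp [hh]
  have hper : periodicN parent p := by
    refine ⟨C'.length, hc0, ?_⟩
    have := chain_piter_getElem hch C'.length 0 (by simp)
    simpa [hL0, hLc] using this
  have hmut : ∀ x ∈ C', reaches parent p x ∧ reaches parent x p := by
    intro x hx
    obtain ⟨j, hj, rfl⟩ := List.mem_iff_getElem.mp hx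
    have hLj : (C' ++ [p])[j]'(by simp only [List.length_append, List.length_cons, List.length_nil, List.length_singleton]; omega) = C'[j] := List.getElem_append_left hj
    constructor
    · have := chain_reaches hch (Nat.zero_le j) (by simp; omega)
      rwa [hL0, hLj] at this
    · have := chain_reaches hch (Nat.le_of_lt hj) (by simp)
      rwa [hLj, hLc] at this
  refine ⟨hper, hmut, ?_⟩
  intro x hx y hy
  obtain ⟨j, hj, rfl⟩ := List.mem_iff_getElem.mp hx
  have hLj : (C' ++ [p])[j]'(by simp only [List.length_append, List.length_cons, List.length_nil, List.length_singleton]; omega) = C'[j] := List.getElem_append_left hj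
  have hstep : pstep parent ((C' ++ [p])[j]'(by simp only [List.length_append, List.length_cons, List.length_nil, List.length_singleton]; omega)) ((C' ++ [p])[j+1]'(by simp only [List.length_append, List.length_cons, List.length_nil, List.length_singleton]; omega)) :=
    List.isChain_iff_getElem.mp hch j (by simp; omega)
  rw [hLj] at hstep
  have hyx : y = (C' ++ [p])[j+1]'(by simp only [List.length_append, List.length_cons, List.length_nil, List.length_singleton]; omega) := pstep_det hy hstep
  by_cases hjc : j + 1 < C'.length
  · have : (C' ++ [p])[j+1]'(by simp only [List.length_append, List.length_cons, List.length_nil, List.length_singleton]; omega) = C'[j+1] := List.getElem_append_left hjc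
    rw [hyx, this]
    exact List.getElem_mem _
  · have hj1 : j + 1 = C'.length := by omega
    have : (C' ++ [p])[j+1]'(by simp only [List.length_append, List.length_cons, List.length_nil, List.length_singleton]; omega) = p := by
      rw [hyx] at *
      have := hLc
      simp_all [hj1]
    rw [hyx, this]
    exact hmemp

theorem bw_run {parent : List (Option Int)} (hPre : Pre_search_parent parent) :
    ∀ (fuel : Nat) (P : List Int) (p v : Int),
    List.IsChain (pstep parent) (P ++ [p]) → P.Nodup → (∀ x ∈ P, InR parent x) →
    InR parent p → (P ++ [p]).head? = some v →
    parent.length + 1 ≤ fuel + P.length →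
    ∃ r, altRootOf parent fuel p P = some r ∧ isRootOf parent v r := by
  intro fuel
  induction fuel with
  | zero =>
    intro P p v hch hnd hin hp hh hf
    exfalso
    have h1 := nodup_inr_length hnd hin
    omega
  | succ fuel ih =>
    intro P p v hch hnd hin hp hh hf
    cases hx : pnext parent p with
    | none =>
      refine ⟨p, ?_, chain_head?_reaches hch hh (by simp), Or.inl hx⟩
      show altRootOf parent (fuel+1) p P = some p
      unfold altRootOf
      rw [pg_pnext hp, hx]
    | some w =>
      by_cases hmem : p ∈ P
      · -- p closes a cycle
        obtain ⟨P₁, P₂, rfl⟩ := List.append_of_mem hmem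
        have hassoc : (P₁ ++ p :: P₂) ++ [p] = P₁ ++ ((p :: P₂) ++ [p]) := by simp
        have hchC : List.IsChain (pstep parent) ((p :: P₂) ++ [p]) := by
          have h2 := hch
          rw [hassoc] at h2
          exact (List.isChain_append.mp h2).2.1
        have hndC : (p :: P₂).Nodup := (List.nodup_append.mp hnd).2.1
        have hinC : ∀ x ∈ p :: P₂, InR parent x := fun x hx => hin x (by simp [hx])
        obtain ⟨m, hcm, hmm, hlb⟩ := cm_main hPre hchC hndC hinC hx
        refine ⟨m, ?_, ?_⟩
        · show altRootOf parent (fuel+1) p (P₁ ++ p :: P₂) = some m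
          unfold altRootOf
          rw [pg_pnext hp, hx]
          have hc : PySem.Set.contains (P₁ ++ p :: P₂) p = true := by
            simp [PySem.Set.contains]
          simp only [hc, if_true]
          exact hcm
        · obtain ⟨hper_p, hmut, hclosed⟩ := loop_facts hchC (by simp)
          have hvp : reaches parent v p := chain_head?_reaches hch hh (by simp)
          have hpm : isRootOf parent p m := by
            refine ⟨(hmut m hmm).1, Or.inr ⟨periodic_of_reach hper_p (hmut m hmm).1, ?_⟩⟩
            intro u hu _
            obtain ⟨k, hk⟩ := hu
            exact hlb u (closed_piter hclosed (by simp) hk)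
          exact rootOf_chain hvp hpm
      · -- fresh node: step
        have hcont : PySem.Set.contains P p = false := by
          simp [PySem.Set.contains]
          exact hmem
        have hadd : PySem.Set.add P p = P ++ [p] := by
          simp [PySem.Set.add, PySem.Set.contains, hmem]
        have hwin : InR parent w := pre_step_InR hPre hp hx
        have hne : P ++ [p] ≠ [] := by simp
        have hch' : List.IsChain (pstep parent) ((P ++ [p]) ++ [w]) := by
          rw [List.isChain_append]
          refine ⟨hch, by simp, ?_⟩
          intro a ha b hb
          simp [List.getLast?_concat] at ha
          simp at hb
          subst ha; subst hb
          exact hx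
        have hnd' : (P ++ [p]).Nodup := by
          simp [List.nodup_append, hnd]
          exact fun a ha h => hmem (h ▸ ha)
        have hin' : ∀ x ∈ P ++ [p], InR parent x := by
          intro x hx'
          rcases List.mem_append.mp hx' with h | h
          · exact hin x h
          · simp at h; subst h; exact hp
        have hh' : ((P ++ [p]) ++ [w]).head? = some v := by
          cases hPp : P ++ [p] with
          | nil => exact absurd hPp hne
          | cons a t =>
            rw [hPp] at hh
            simpa using hh
        obtain ⟨r, hr, hroot⟩ := ih (P ++ [p]) w v hch' hnd' hin' hwin hh' (by simp; omega)
        refine ⟨r, ?_, hroot⟩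
        show altRootOf parent (fuel+1) p P = some r
        unfold altRootOf
        rw [pg_pnext hp, hx]
        simp only [hcont, Bool.false_eq_true, if_false]
        rw [hadd]
        exact hr

theorem bw_main {parent : List (Option Int)} (hPre : Pre_search_parent parent)
    {v : Int} (hv : InR parent v) :
    ∃ r, rootB parent v = some r ∧ isRootOf parent v r := by
  obtain ⟨r, hr, hroot⟩ := bw_run hPre (parent.length + 1) [] v v (by simp)
    List.nodup_nil (by simp) hv (by simp) (by omega)
  exact ⟨r, by simpa [rootB, PySem.Set.empty] using hr, hroot⟩

theorem rootB_val {parent : List (Option Int)} (hPre : Pre_search_parent parent)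
    {v r : Int} (hv : InR parent v) (h : rootB parent v = some r) :
    isRootOf parent v r := by
  obtain ⟨r', hr', hroot⟩ := bw_main hPre hv
  rw [h] at hr'
  cases hr'
  exact hroot

-- ---------- A-side invariant ----------

structure AInv (parent : List (Option Int)) (k : Int) (t : List (Option Int)) : Prop where
  len : t.length = parent.length
  val : ∀ u : Int, InR parent u → ∀ r : Int, t[u.toNat]? = some (some r) →
    rootB parent u = some r ∧ ∃ v', 0 ≤ v' ∧ v' < k ∧ rootB parent v' = some r
  closed : ∀ u : Int, InR parent u → (∃ c, t[u.toNat]? = some (some c)) →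
    ∀ w, pstep parent u w → ∃ c, t[w.toNat]? = some (some c)
  proc : ∀ v' : Int, 0 ≤ v' → v' < k → ∃ c, t[v'.toNat]? = some (some c)

theorem cell_total {parent t : List (Option Int)} (hlen : t.length = parent.length)
    {u : Int} (hu : InR parent u) : ∃ cell, t[u.toNat]? = some cell := by
  have : u.toNat < t.length := by obtain ⟨h1, h2⟩ := hu; omega
  exact ⟨t[u.toNat], List.getElem?_eq_getElem this⟩

theorem aclosed_reaches {parent t : List (Option Int)} (hPre : Pre_search_parent parent)
    (hlen : t.length = parent.length)
    (hcl : ∀ u : Int, InR parent u → (∃ c, t[u.toNat]? = some (some c)) →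
      ∀ w, pstep parent u w → ∃ c, t[w.toNat]? = some (some c))
    {u w : Int} (hu : InR parent u) (hc : ∃ c, t[u.toNat]? = some (some c))
    (hr : reaches parent u w) : ∃ c, t[w.toNat]? = some (some c) := by
  obtain ⟨k, hk⟩ := hr
  induction k generalizing u with
  | zero => cases hk; exact hc
  | succ k ih =>
    change (pnext parent u).bind _ = _ at hk
    cases hx : pnext parent u with
    | none => rw [hx] at hk; cases hk
    | some x =>
      rw [hx] at hk
      exact ih (pre_step_InR hPre hu hx) (hcl u hu hc x hx) hk

theorem pyGet_neg_one {α : Type} (L : List α) (hne : L ≠ []) :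
    PySem.List.pyGet? L (-1) = some (L.getLast hne) := by
  have h0 : 0 < L.length := List.length_pos_iff.mpr hne
  rw [PySem.List.pyGet?_neg]
  · rw [List.getLast_eq_getElem]
    rw [List.getElem?_eq_getElem (by simp; omega)]
    simp
  · omega
  · omega

theorem chain_mem_reaches_last {parent : List (Option Int)} {L : List Int} {x : Int}
    (h : List.IsChain (pstep parent) L) (hne : L ≠ []) (hx : x ∈ L) :
    reaches parent x (L.getLast hne) := by
  obtain ⟨j, hj, rfl⟩ := List.mem_iff_getElem.mp hx
  rw [List.getLast_eq_getElem]
  exact chain_reaches h (by omega) (by omega)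

theorem chain_closure_append {parent : List (Option Int)} {L : List Int} {p : Int}
    (hch : List.IsChain (pstep parent) (L ++ [p])) :
    ∀ u ∈ L, ∀ y, pstep parent u y → y ∈ L ∨ y = p := by
  intro u hu y hy
  obtain ⟨j, hj, rfl⟩ := List.mem_iff_getElem.mp hu
  have hb : j + 1 < (L ++ [p]).length := by simp; omega
  have hLj : (L ++ [p])[j]'(by simp; omega) = L[j] := List.getElem_append_left hj
  have hstep := List.isChain_iff_getElem.mp hch j hb
  rw [hLj] at hstep
  have hyx := pstep_det hy hstep
  by_cases hjc : j + 1 < L.length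
  · left
    rw [hyx, List.getElem_append_left hjc]
    exact List.getElem_mem _
  · right
    rw [hyx, List.getElem_append_right (by omega)]
    have hj1 : j + 1 - L.length = 0 := by omega
    simp [hj1]

theorem chain_closure_term {parent : List (Option Int)} {L : List Int}
    (hch : List.IsChain (pstep parent) L) (hne : L ≠ [])
    (hterm : pnext parent (L.getLast hne) = none) :
    ∀ u ∈ L, ∀ y, pstep parent u y → y ∈ L := by
  intro u hu y hy
  obtain ⟨j, hj, rfl⟩ := List.mem_iff_getElem.mp hu
  by_cases hjc : j + 1 < L.length
  · have hstep := List.isChain_iff_getElem.mp hch j hjc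
    rw [pstep_det hy hstep]
    exact List.getElem_mem _
  · exfalso
    have hj1 : j = L.length - 1 := by omega
    subst hj1
    unfold pstep at hy
    rw [List.getLast_eq_getElem] at hterm
    rw [hterm] at hy
    cases hy

theorem index?_append_cons_self (P₁ P₂ : List Int) (p : Int) (hnotin : p ∉ P₁) :
    PySem.List.index? (P₁ ++ p :: P₂) p = some P₁.length := by
  induction P₁ with
  | nil => simpa using PySem.List.index?_cons_self ..
  | cons a s ih =>
    have ha : a ≠ p := by intro h; exact hnotin (by simp [h])
    rw [List.cons_append, PySem.List.index?_cons_of_ne _ ha,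
      ih (by intro h; exact hnotin (by simp [h]))]
    rfl

theorem ai_run {parent t : List (Option Int)} (hPre : Pre_search_parent parent)
    (inv : AInv parent k t) {v : Int} (hv : InR parent v)
    (hvcell : t[v.toNat]? = some none) :
    ∀ (fuel : Nat) (P : List Int) (pOpt : Option Int) (roots : List Int),
    List.IsChain (pstep parent) (P ++ pOpt.toList) → P.Nodup →
    (∀ x ∈ P, InR parent x) → (∀ x ∈ P, t[x.toNat]? = some none) →
    (P ++ pOpt.toList).head? = some v →
    (∀ p, pOpt = some p → InR parent p) →
    (pOpt = none → ∃ hne : P ≠ [], pnext parent (P.getLast hne) = none) →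
    parent.length + 1 ≤ fuel + P.length →
    ∃ stack r roots',
      spA_inner parent v fuel pOpt (spWriteAll t P v) P roots =
        some (spWriteAll t stack v, stack, roots', r) ∧
      P.IsPrefix stack ∧ stack.Nodup ∧ (∀ x ∈ stack, InR parent x) ∧
      (∀ x ∈ stack, t[x.toNat]? = some none) ∧
      (∀ p, pOpt = some p → t[p.toNat]? = some none → p ∈ stack) ∧
      (∀ u ∈ stack, isRootOf parent u r) ∧
      (∀ u ∈ stack, ∀ y, pstep parent u y → y ∈ stack ∨ ∃ c, t[y.toNat]? = some (some c)) ∧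
      ((roots' = roots ++ [r] ∧ t[r.toNat]? = some none) ∨
        (roots' = roots ∧ ∃ p', InR parent p' ∧ t[p'.toNat]? = some (some r))) := by
  intro fuel
  induction fuel with
  | zero =>
    intro P pOpt roots hch hnd hPin hPcell hh hpin hterm hf
    exfalso
    have := nodup_inr_length hnd hPin
    omega
  | succ fuel ih =>
    intro P pOpt roots hch hnd hPin hPcell hh hpin hterm hf
    have hsW : ∀ u ∈ P, 0 ≤ u ∧ u < (t.length : Int) := by
      intro u hu
      have h2 := hPin u hu
      rw [inv.len]
      exact ⟨h2.1, h2.2⟩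
    have hread : ∀ q : Int, InR parent q →
        PySem.List.pyGet? (spWriteAll t P v) q =
          if q ∈ P then some (some v) else t[q.toNat]? := by
      intro q hq
      rw [PySem.List.pyGet?_of_nonneg _ hq.1, getElem?_spWriteAll P t v hsW q.toNat,
        Int.toNat_of_nonneg hq.1]
    have hmark : ∀ q : Int, InR parent q → t[q.toNat]? ≠ some (some v) := by
      intro q hq hcon
      obtain ⟨c, hc⟩ := aclosed_reaches hPre inv.len inv.closed hq ⟨v, hcon⟩
        (rootB_val hPre hq (inv.val q hq v hcon).1).1
      rw [hvcell] at hc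
      cases hc
    rcases pOpt with _ | p
    · -- while-else: the chain ended below a missing parent
      obtain ⟨hne, hlast⟩ := hterm rfl
      have hchP : List.IsChain (pstep parent) P := by simpa using hch
      have hhP : P.head? = some v := by simpa using hh
      have hrootlast : isRootOf parent (P.getLast hne) (P.getLast hne) :=
        ⟨reaches_refl .., Or.inl hlast⟩
      refine ⟨P, P.getLast hne, roots ++ [P.getLast hne], ?_, List.prefix_refl P, hnd, hPin,
        hPcell, (by intro q hq; cases hq), ?_, ?_, Or.inl ⟨rfl, hPcell _ (List.getLast_mem hne)⟩⟩
      · show spA_inner parent v (fuel+1) none (spWriteAll t P v) P roots = _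
        simp only [spA_inner, pyGet_neg_one P hne]
      · intro u hu
        exact rootOf_chain (chain_mem_reaches_last hchP hne hu) hrootlast
      · intro u hu y hy
        exact Or.inl (chain_closure_term hchP hne hlast u hu y hy)
    · -- active node p
      have hpInR := hpin p rfl
      have hchP : List.IsChain (pstep parent) (P ++ [p]) := by simpa using hch
      have hreach_up : ∀ u ∈ P, reaches parent u p := by
        intro u hu
        have h2 := chain_mem_reaches_last hchP (by simp) (List.mem_append_left _ hu)
        rwa [List.getLast_concat] at h2
      by_cases hmem : p ∈ P
      · -- circle: marker value v read back
        obtain ⟨P₁, P₂, rfl⟩ := List.append_of_mem hmem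
        have hassoc : (P₁ ++ p :: P₂) ++ [p] = P₁ ++ ((p :: P₂) ++ [p]) := by simp
        have hchC : List.IsChain (pstep parent) ((p :: P₂) ++ [p]) := by
          have h2 := hchP
          rw [hassoc] at h2
          exact (List.isChain_append.mp h2).2.1
        obtain ⟨hper, hmut, hclosed⟩ := loop_facts hchC (by simp)
        have hnotin : p ∉ P₁ := by
          intro hin'
          have h2 := List.nodup_append.mp hnd
          exact h2.2.2 p hin' p (List.mem_cons_self ..) rfl
        have hidx : PySem.List.index? (P₁ ++ p :: P₂) p = some P₁.length :=
          index?_append_cons_self P₁ P₂ p hnotin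
        have hslice : PySem.List.slice (P₁ ++ p :: P₂) (some (P₁.length : Int)) none = p :: P₂ := by
          rw [PySem.List.slice_from _ (by omega)]
          simp
        cases hm : PySem.List.min? (p :: P₂) (fun x => x) with
        | none => exact absurd ((PySem.List.min?_eq_none_iff _ _).mp hm) (by simp)
        | some r =>
          have hr_mem : r ∈ p :: P₂ := PySem.List.min?_mem hm
          have hr_lb : ∀ y ∈ p :: P₂, r ≤ y := fun y hy => PySem.List.min?_isMin hm y hy
          have hrootp : isRootOf parent p r := by
            refine ⟨(hmut r hr_mem).1, Or.inr ⟨periodic_of_reach hper (hmut r hr_mem).1, ?_⟩⟩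
            intro u hu _
            obtain ⟨k, hk⟩ := hu
            exact hr_lb u (closed_piter hclosed (by simp) hk)
          have hmemP : ∀ y ∈ p :: P₂, y ∈ P₁ ++ p :: P₂ := by
            intro y hy
            exact List.mem_append_right _ hy
          refine ⟨P₁ ++ p :: P₂, r, roots ++ [r], ?_, List.prefix_refl _, hnd, hPin, hPcell,
            (by intro q hq _; injection hq with hq; subst hq; exact hmem), ?_, ?_,
            Or.inl ⟨rfl, hPcell r (hmemP r hr_mem)⟩⟩
          · show spA_inner parent v (fuel+1) (some p) (spWriteAll t (P₁ ++ p :: P₂) v)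
              (P₁ ++ p :: P₂) roots = _
            have hreadp : PySem.List.pyGet? (spWriteAll t (P₁ ++ p :: P₂) v) p = some (some v) := by
              rw [hread p hpInR, if_pos hmem]
            simp only [spA_inner, hreadp, hidx, hslice, hm]
            simp
          · intro u hu
            exact rootOf_chain (hreach_up u hu) hrootp
          · intro u hu y hy
            rcases chain_closure_append hchP u hu y hy with h | h
            · exact Or.inl h
            · exact Or.inl (h ▸ hmem)
      · -- p not on the current path: read the global cell
        obtain ⟨cell, hcell⟩ := cell_total inv.len hpInR
        have hreadp : PySem.List.pyGet? (spWriteAll t P v) p = some cell := by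
          rw [hread p hpInR, if_neg hmem, hcell]
        cases cell with
        | none =>
          -- unresolved: push p and walk up
          have hset : PySem.List.pySetD (spWriteAll t P v) p (some v) =
              spWriteAll t (P ++ [p]) v := by
            simp [spWriteAll, List.foldl_append]
          have hch' : List.IsChain (pstep parent)
              ((P ++ [p]) ++ (pnext parent p).toList) := by
            cases hx : pnext parent p with
            | none => simpa using hchP
            | some w =>
              rw [List.isChain_append]
              refine ⟨hchP, by simp, ?_⟩
              intro a ha b hb
              simp [List.getLast?_concat] at ha
              simp at hb
              subst ha; subst hb
              exact hx
          have hnd' : (P ++ [p]).Nodup := by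
            simp [List.nodup_append, hnd]
            exact fun a ha h => hmem (h ▸ ha)
          have hPin' : ∀ x ∈ P ++ [p], InR parent x := by
            intro x hx'
            rcases List.mem_append.mp hx' with h | h
            · exact hPin x h
            · simp at h; subst h; exact hpInR
          have hPcell' : ∀ x ∈ P ++ [p], t[x.toNat]? = some none := by
            intro x hx'
            rcases List.mem_append.mp hx' with h | h
            · exact hPcell x h
            · simp at h; subst h; exact hcell
          have hh' : ((P ++ [p]) ++ (pnext parent p).toList).head? = some v := by
            have hh2 : (P ++ [p]).head? = some v := by simpa using hh
            simp only [List.head?_append]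
            cases P with
            | nil => simpa using hh2
            | cons a s => simpa using hh2
          have hpin' : ∀ q, pnext parent p = some q → InR parent q := by
            intro q hq
            exact pre_step_InR hPre hpInR hq
          have hterm' : pnext parent p = none →
              ∃ hne : (P ++ [p]) ≠ [], pnext parent ((P ++ [p]).getLast hne) = none := by
            intro hx
            exact ⟨by simp, by rwa [List.getLast_concat]⟩
          obtain ⟨stack, r, roots', heq, hpre, hsnd, hsin, hscell, hsm, hsroot, hsclose, hdisj⟩ :=
            ih (P ++ [p]) (pnext parent p) roots hch' hnd' hPin' hPcell' hh' hpin' hterm'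
              (by simp; omega)
          refine ⟨stack, r, roots', ?_, (List.prefix_append P [p]).trans hpre, hsnd, hsin,
            hscell, ?_, hsroot, hsclose, hdisj⟩
          · show spA_inner parent v (fuel+1) (some p) (spWriteAll t P v) P roots = _
            simp only [spA_inner, hreadp, pg_pnext hpInR, if_true]
            rw [hset]
            exact heq
          · intro q hq _
            injection hq with hq
            subst hq
            exact hpre.subset (by simp)
        | some r0 =>
          -- branch: inherit the already-final root r0
          have hr0v : ¬ ((some r0 : Option Int) = some v) := by
            intro h
            injection h with h
            exact hmark p hpInR (h ▸ hcell)
          have hrootp : isRootOf parent p r0 :=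
            rootB_val hPre hpInR (inv.val p hpInR r0 hcell).1
          refine ⟨P, r0, roots, ?_, List.prefix_refl _, hnd, hPin, hPcell, ?_, ?_, ?_,
            Or.inr ⟨rfl, p, hpInR, hcell⟩⟩
          · show spA_inner parent v (fuel+1) (some p) (spWriteAll t P v) P roots = _
            simp only [spA_inner, hreadp]
            simp [hr0v]
          · intro q hq hqc
            injection hq with hq
            subst hq
            rw [hcell] at hqc
            cases hqc
          · intro u hu
            exact rootOf_chain (hreach_up u hu) hrootp
          · intro u hu y hy
            rcases chain_closure_append hchP u hu y hy with h | h
            · exact Or.inl h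
            · exact Or.inr (h ▸ ⟨r0, hcell⟩)

-- ---------- outer induction ----------

theorem outer_run {parent : List (Option Int)} (hPre : Pre_search_parent parent) :
    ∀ K : Nat, K ≤ parent.length →
    (AInv parent (K : Int)
      ((List.range K).foldl (fun st (k : Nat) => spA_step parent st (k : Int))
        ([], List.replicate parent.length none)).2) ∧
    ((List.range K).foldl (fun st (k : Nat) => spA_step parent st (k : Int))
        ([], List.replicate parent.length none)).1 =
      (((List.range K).map (fun (k : Nat) => rootB parent (k : Int))).foldl altDedupStep
        ([], PySem.Set.empty)).1 ∧
    (∀ r : Int, r ∈ (((List.range K).map (fun (k : Nat) => rootB parent (k : Int))).foldl altDedupStep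
        ([], PySem.Set.empty)).2 ↔
      ∃ v' : Int, 0 ≤ v' ∧ v' < (K : Int) ∧ rootB parent v' = some r) := by
  intro K
  induction K with
  | zero =>
    intro _
    simp only [List.range_zero, List.foldl_nil, List.map_nil]
    refine ⟨⟨by simp, ?_, ?_, ?_⟩, trivial, ?_⟩
    · intro u hu r hr
      rw [List.getElem?_replicate] at hr
      split_ifs at hr <;> simp_all
    · intro u hu hc w hw
      obtain ⟨c, hc⟩ := hc
      rw [List.getElem?_replicate] at hc
      split_ifs at hc <;> simp_all
    · intro v' h0 hK
      simp at hK
      omega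
    · intro r
      simp
      intro v' h0 hK
      omega
  | succ K ih =>
    intro hK1
    obtain ⟨inv, hroots, hemit⟩ := ih (by omega)
    simp only [List.range_succ, List.map_append, List.map_cons, List.map_nil,
      List.foldl_append, List.foldl_cons, List.foldl_nil]
    set stA := (List.range K).foldl (fun st (k : Nat) => spA_step parent st (k : Int))
      ([], List.replicate parent.length none) with hstA
    set stB := ((List.range K).map (fun (k : Nat) => rootB parent (k : Int))).foldl altDedupStep
      ([], PySem.Set.empty) with hstB
    have hKInR : InR parent (K : Int) := ⟨by omega, by omega⟩
    have hKt : ((K : Int)).toNat = K := Int.toNat_natCast K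
    obtain ⟨cellK, hcellK⟩ := cell_total inv.len hKInR
    have hgetK : PySem.List.pyGet? stA.2 (K : Int) = some cellK := by
      rw [PySem.List.pyGet?_of_nonneg _ (by omega : (0:Int) ≤ (K:Int))]
      rwa [hKt] at hcellK ⊢
    cases cellK with
    | some c =>
      -- node K already resolved: both sides skip
      have hAval := inv.val (K : Int) hKInR c hcellK
      have hAskip : spA_step parent stA (K : Int) = stA := by
        unfold spA_step
        rw [hgetK]
        simp
      have hBskip : altDedupStep stB (rootB parent (K : Int)) = stB := by
        rw [hAval.1]
        have hcont : PySem.Set.contains stB.2 c = true := by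
          have := (hemit c).mpr hAval.2
          simpa [PySem.Set.contains] using this
        show (if PySem.Set.contains stB.2 c = true then stB
          else (stB.1 ++ [c], PySem.Set.add stB.2 c)) = stB
        rw [hcont]
        simp
      rw [hAskip, hBskip]
      refine ⟨⟨inv.len, ?_, inv.closed, ?_⟩, hroots, ?_⟩
      · intro u hu r hr
        obtain ⟨h1, v', h2, h3, h4⟩ := inv.val u hu r hr
        exact ⟨h1, v', h2, by push_cast; omega, h4⟩
      · intro v' h0 hKlt
        by_cases hvK : v' < (K : Int)
        · exact inv.proc v' h0 hvK
        · have hvk : v' = (K : Int) := by omega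
          subst hvk
          exact ⟨c, hcellK⟩
      · intro r
        rw [hemit r]
        constructor
        · rintro ⟨v', h0, h2, h3⟩
          exact ⟨v', h0, by push_cast; omega, h3⟩
        · rintro ⟨v', h0, h2, h3⟩
          by_cases hvK : v' < (K : Int)
          · exact ⟨v', h0, hvK, h3⟩
          · have hvk : v' = (K : Int) := by omega
            subst hvk
            rw [hAval.1] at h3
            injection h3 with h3
            subst h3
            exact hAval.2
    | none =>
      -- node K unresolved: A walks, B's root is appended or skipped consistently
      obtain ⟨stack, r, roots', heq, hpre, hsnd, hsin, hscell, hsm, hsroot, hsclose, hdisj⟩ :=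
        ai_run hPre inv hKInR hcellK (parent.length + 1) [] (some (K : Int)) stA.1
          (by simp) List.nodup_nil (by simp) (by simp) (by simp)
          (by intro q hq; injection hq with hq; exact hq ▸ hKInR)
          (by intro h; cases h) (by simp)
      have hKmem : (K : Int) ∈ stack := hsm (K : Int) rfl hcellK
      have hrootK : isRootOf parent (K : Int) r := hsroot _ hKmem
      have hrootBK : rootB parent (K : Int) = some r := by
        obtain ⟨r', hr', hroot'⟩ := bw_main hPre hKInR
        rw [hr', rootOf_unique hroot' hrootK]
      have hsWt : ∀ u ∈ stack, 0 ≤ u ∧ u < (stA.2.length : Int) := by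
        intro u hu
        have h2 := hsin u hu
        rw [inv.len]
        exact ⟨h2.1, h2.2⟩
      have hAstep : spA_step parent stA (K : Int) = (roots', spWriteAll stA.2 stack r) := by
        unfold spA_step
        rw [hgetK]
        simp only [ne_eq, not_true_eq_false, if_false]
        have heq2 : spA_inner parent (K : Int) (parent.length + 1) (some (K : Int)) stA.2 [] stA.1 =
            some (spWriteAll stA.2 stack (K : Int), stack, roots', r) := by
          have h3 : spWriteAll stA.2 [] (K : Int) = stA.2 := rfl
          rw [← h3]
          exact heq
        rw [heq2]
        show (roots', spWriteAll (spWriteAll stA.2 stack (K : Int)) stack r) = _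
        rw [spWriteAll_overwrite stack stA.2 (K : Int) r hsWt]
      have hget' : ∀ i : Nat, (spWriteAll stA.2 stack r)[i]? =
          if (i : Int) ∈ stack then some (some r) else stA.2[i]? :=
        getElem?_spWriteAll stack stA.2 r hsWt
      have hinv' : AInv parent ((K + 1 : Nat) : Int) (spWriteAll stA.2 stack r) := by
        refine ⟨by rw [length_spWriteAll]; exact inv.len, ?_, ?_, ?_⟩
        · intro u hu r₀ hcell'
          rw [hget' u.toNat, Int.toNat_of_nonneg hu.1] at hcell'
          by_cases hus : u ∈ stack
          · rw [if_pos hus] at hcell'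
            injection hcell' with hcell'
            injection hcell' with hcell'
            subst hcell'
            have hrB : rootB parent u = some r := by
              obtain ⟨r'', hr'', hroot''⟩ := bw_main hPre hu
              rw [hr'', rootOf_unique hroot'' (hsroot u hus)]
            exact ⟨hrB, (K : Int), by omega, by push_cast; omega, hrootBK⟩
          · rw [if_neg hus] at hcell'
            obtain ⟨h1, v', h0, hvK, h3⟩ := inv.val u hu r₀ hcell'
            exact ⟨h1, v', h0, by push_cast at hvK ⊢; omega, h3⟩
        · intro u hu hc w hw
          have hwInR := pre_step_InR hPre hu hw
          rw [hget' w.toNat, Int.toNat_of_nonneg hwInR.1]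
          by_cases hws : w ∈ stack
          · exact ⟨r, by rw [if_pos hws]⟩
          · rw [if_neg hws]
            obtain ⟨c0, hc0⟩ := hc
            rw [hget' u.toNat, Int.toNat_of_nonneg hu.1] at hc0
            by_cases hus : u ∈ stack
            · rcases hsclose u hus w hw with h | h
              · exact absurd h hws
              · exact h
            · rw [if_neg hus] at hc0
              exact inv.closed u hu ⟨c0, hc0⟩ w hw
        · intro v' h0 hK1'
          by_cases hvK : v' < (K : Int)
          · obtain ⟨c0, hc0⟩ := inv.proc v' h0 hvK
            rw [hget' v'.toNat, Int.toNat_of_nonneg h0]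
            by_cases hvs : v' ∈ stack
            · exact ⟨r, by rw [if_pos hvs]⟩
            · exact ⟨c0, by rw [if_neg hvs]; exact hc0⟩
          · have hvk : v' = (K : Int) := by push_cast at hK1'; omega
            subst hvk
            rw [hget' (K : Int).toNat, Int.toNat_of_nonneg (by omega : (0:Int) ≤ (K:Int))]
            exact ⟨r, by rw [if_pos hKmem]⟩
      rcases hdisj with ⟨hroots', hrnone⟩ | ⟨hroots', p', hp'in, hp'cell⟩
      · -- new component root: B appends the same value
        have hnotE : ¬ ∃ v', 0 ≤ v' ∧ v' < (K : Int) ∧ rootB parent v' = some r := by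
          rintro ⟨v', h0, hvK, hrB⟩
          have hv'InR : InR parent v' := ⟨h0, by omega⟩
          obtain ⟨c1, hc1⟩ := aclosed_reaches hPre inv.len inv.closed hv'InR
            (inv.proc v' h0 hvK) (rootB_val hPre hv'InR hrB).1
          rw [hrnone] at hc1
          cases hc1
        have hnm : r ∉ stB.2 := fun hm => hnotE ((hemit r).mp hm)
        have hcont : PySem.Set.contains stB.2 r = false := by
          simp [PySem.Set.contains]
          exact hnm
        have hBstep : altDedupStep stB (rootB parent (K : Int)) =
            (stB.1 ++ [r], PySem.Set.add stB.2 r) := by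
          rw [hrootBK]
          show (if PySem.Set.contains stB.2 r = true then stB
            else (stB.1 ++ [r], PySem.Set.add stB.2 r)) = _
          rw [hcont]
          simp
        rw [hAstep, hBstep]
        refine ⟨hinv', by simp [hroots', hroots], ?_⟩
        intro r₀
        have hadd : PySem.Set.add stB.2 r = stB.2 ++ [r] := by
          simp [PySem.Set.add, PySem.Set.contains, hnm]
        rw [hadd]
        simp only [List.mem_append, List.mem_singleton]
        constructor
        · rintro (hm | rfl)
          · obtain ⟨v', h0, hvK, h3⟩ := (hemit r₀).mp hm
            exact ⟨v', h0, by push_cast; omega, h3⟩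
          · exact ⟨(K : Int), by omega, by push_cast; omega, hrootBK⟩
        · rintro ⟨v', h0, hvK1, h3⟩
          by_cases hvK : v' < (K : Int)
          · exact Or.inl ((hemit r₀).mpr ⟨v', h0, hvK, h3⟩)
          · have hvk : v' = (K : Int) := by push_cast at hvK1; omega
            subst hvk
            rw [hrootBK] at h3
            injection h3 with h3
            exact Or.inr h3.symm
      · -- root inherited from an earlier component: B skips
        have hEx := (inv.val p' hp'in r hp'cell).2
        have hcont : PySem.Set.contains stB.2 r = true := by
          have := (hemit r).mpr hEx
          simpa [PySem.Set.contains] using this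
        have hBstep : altDedupStep stB (rootB parent (K : Int)) = stB := by
          rw [hrootBK]
          show (if PySem.Set.contains stB.2 r = true then stB
            else (stB.1 ++ [r], PySem.Set.add stB.2 r)) = _
          rw [hcont]
          simp
        rw [hAstep, hBstep]
        refine ⟨hinv', by simp [hroots', hroots], ?_⟩
        intro r₀
        rw [hemit r₀]
        constructor
        · rintro ⟨v', h0, hvK, h3⟩
          exact ⟨v', h0, by push_cast; omega, h3⟩
        · rintro ⟨v', h0, hvK1, h3⟩
          by_cases hvK : v' < (K : Int)
          · exact ⟨v', h0, hvK, h3⟩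
          · have hvk : v' = (K : Int) := by push_cast at hvK1; omega
            subst hvk
            rw [hrootBK] at h3
            injection h3 with h3
            subst h3
            exact hEx


-- ===== VERDICT (by name: the statement is the Claim_ definition above) =====
theorem search_parent_spec : Claim_equal_search_parent := by
  intro parent _ hPre
  unfold Spec_search_parent
  obtain ⟨inv, hroots, hemit⟩ := outer_run hPre parent.length (le_refl _)
  have hrange : PySem.List.pyRange 0 (parent.length : Int) 1 =
      (List.range parent.length).map (fun (k : Nat) => (k : Int)) := by
    rw [PySem.List.pyRange_one]
    simp
  have hA : search_parent parent =
      (List.range parent.length).foldl (fun st (k : Nat) => spA_step parent st (k : Int))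
        ([], List.replicate parent.length none) := by
    unfold search_parent
    rw [hrange, List.foldl_map]
  have hBlist : (PySem.List.pyRange 0 (parent.length : Int) 1).map
      (fun v => altRootOf parent (parent.length + 1) v PySem.Set.empty) =
      (List.range parent.length).map (fun (k : Nat) => rootB parent (k : Int)) := by
    rw [hrange, List.map_map]
    rfl
  have hB : search_parent_alt parent =
      ((((List.range parent.length).map (fun (k : Nat) => rootB parent (k : Int))).foldl
        altDedupStep ([], PySem.Set.empty)).1,
       (List.range parent.length).map (fun (k : Nat) => rootB parent (k : Int))) := by
    unfold search_parent_alt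
    rw [hBlist]
  rw [hA, hB]
  refine Prod.ext ?_ ?_
  · exact hroots
  · apply List.ext_getElem?
    intro i
    by_cases hi : i < parent.length
    · have hit : ((i : Int)).toNat = i := Int.toNat_natCast i
      obtain ⟨c, hc⟩ := inv.proc (i : Int) (by omega) (by push_cast; omega)
      rw [hit] at hc
      have hval := (inv.val (i : Int) ⟨by omega, by push_cast; omega⟩ c (by rw [hit]; exact hc)).1
      rw [hc, List.getElem?_map, List.getElem?_range hi]
      simp [hval]
    · rw [List.getElem?_eq_none (by rw [inv.len]; omega),
        List.getElem?_eq_none (by simp; omega)]
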